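-- pv_equiv track=rewrite | github.com/StarsExpress/LeetCode-Repository | dp_tabulation/subset_sum.py | find_constrained_subset_sum
-- ===== SOURCE A (Python) =====
-- def find_constrained_subset_sum(numbers: list[int], k: int) -> int:  # LeetCode Q.1425.
--     # Base case: subsequence of only 1st number.
--     best_sum = [numbers[0]] + [0] * (len(numbers) - 1)
--     max_sum = numbers[0]
--
--     # Queue contains indices of best sums from current idx - k to current idx - 1.
--     idx_queue = [0]  # Queue's 1st idx always points to window's best sum.
--     for idx, number in enumerate(numbers):
--         if idx == 0:  # Base case is already done.
--             continue
--
--         best_sum[idx] = number + max(best_sum[idx_queue[0]], 0)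
--         if best_sum[idx] > max_sum:
--             max_sum = best_sum[idx]
--
--         # Ensure last idx's corresponding best sum > current number's best sum.
--         while idx_queue and best_sum[idx_queue[-1]] <= best_sum[idx]:
--             idx_queue.pop(-1)
--
--         # Ensure 1st idx will be in "next iteration's window".
--         while idx_queue and idx_queue[0] < idx - k + 1:
--             idx_queue.pop(0)
--
--         idx_queue.append(idx)
--
--     return max_sum
-- ===== SOURCE B (Python) =====
-- def find_constrained_subset_sum(numbers: list[int], k: int) -> int:  # LeetCode Q.1425.
--     # Direct sliding-window DP: best[i] = numbers[i] + max(0, max(best[i-k:i])).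
--     best = [numbers[0]]
--     for i in range(1, len(numbers)):
--         lo = i - k if i - k > 0 else 0
--         window = max(best[lo:i])
--         best.append(numbers[i] + (window if window > 0 else 0))
--     return max(best)
-- ===== Notes on version B (the rewrite author's own statement) =====
-- stated objective: simpler
-- what changed: Replaced the monotonic-deque window maximum with a direct max over the slice best[max(i-k,0):i] inside a single DP loop, returning max(best) at the end.
-- outside the precondition, e.g. on find_constrained_subset_sum([1, 2], 0): A returns 3, B raises ValueError; on find_constrained_subset_sum([], 3): A raises IndexError, B raises IndexError
import Mathlib
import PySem

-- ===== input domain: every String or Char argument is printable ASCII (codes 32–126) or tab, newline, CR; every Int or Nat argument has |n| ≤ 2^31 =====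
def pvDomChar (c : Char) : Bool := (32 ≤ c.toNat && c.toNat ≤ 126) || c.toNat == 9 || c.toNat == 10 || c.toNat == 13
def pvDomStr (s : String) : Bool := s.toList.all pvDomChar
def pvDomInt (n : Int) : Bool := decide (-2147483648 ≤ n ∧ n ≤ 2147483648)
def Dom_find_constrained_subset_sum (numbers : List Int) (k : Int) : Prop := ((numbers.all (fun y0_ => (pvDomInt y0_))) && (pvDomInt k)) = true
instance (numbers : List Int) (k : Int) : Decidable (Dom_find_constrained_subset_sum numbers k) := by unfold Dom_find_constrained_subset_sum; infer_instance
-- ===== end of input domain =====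

-- B replaces A's monotonic deque with a direct max over the window slice best[max(i-k,0):i] (objective: simpler).

-- ===== PORT A =====
-- while idx_queue and best_sum[idx_queue[-1]] <= best_sum[idx]: idx_queue.pop(-1)
def pvPopBack (best : List Int) (b : Int) (q : List Int) : List Int :=
  if h : q = [] then q
  else if PySem.List.pyGetD best (PySem.List.pyGetD q (-1) 0) 0 ≤ b then pvPopBack best b q.dropLast
  else q
termination_by q.length
decreasing_by
  have := List.length_pos_of_ne_nil h
  simp only [List.length_dropLast]; omega

-- while idx_queue and idx_queue[0] < idx - k + 1: idx_queue.pop(0)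
def pvPopFront (bound : Int) (q : List Int) : List Int :=
  match q with
  | [] => []
  | x :: t => if x < bound then pvPopFront bound t else x :: t

-- one iteration of A's main loop (skips idx == 0); best_sum[idx] = … is List.set (idx from
-- enumerate is nonnegative and in range, so this is exact Python list assignment)
def pvAStep (k : Int) (st : List Int × Int × List Int) (p : Int × Int) : List Int × Int × List Int :=
  if p.1 == 0 then st
  else
    let b := p.2 + max (PySem.List.pyGetD st.1 (PySem.List.pyGetD st.2.2 0 0) 0) 0
    let best := st.1.set p.1.toNat b
    let maxSum := if b > st.2.1 then b else st.2.1
    let queue := pvPopFront (p.1 - k + 1) (pvPopBack best b st.2.2)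
    (best, maxSum, queue ++ [p.1])

def find_constrained_subset_sum (numbers : List Int) (k : Int) : Int :=
  -- best_sum = [numbers[0]] + [0] * (len(numbers) - 1); numbers[0] raises IndexError on [] (excluded by Pre_)
  let best := [PySem.List.pyGetD numbers 0 0] ++ PySem.List.pyRepeat [(0 : Int)] ((numbers.length : Int) - 1)
  let st := (PySem.List.enumerate numbers 0).foldl (pvAStep k)
      (best, PySem.List.pyGetD numbers 0 0, [(0 : Int)])
  st.2.1

-- ===== PORT B =====
def find_constrained_subset_sum_alt (numbers : List Int) (k : Int) : Int :=
  -- best = [numbers[0]]; for i in range(1, len(numbers)): lo = …; window = max(best[lo:i]); append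
  let best := (PySem.List.pyRange 1 (numbers.length : Int) 1).foldl (fun best i =>
      let lo := if i - k > 0 then i - k else 0
      -- max(best[lo:i]) raises ValueError on an empty slice (only when k ≤ 0, excluded by Pre_)
      let window := (PySem.List.max? (PySem.List.slice best (some lo) (some i)) (fun x => x)).getD 0
      best ++ [PySem.List.pyGetD numbers i 0 + (if window > 0 then window else 0)])
    [PySem.List.pyGetD numbers 0 0]
  (PySem.List.max? best (fun x => x)).getD 0

-- ===== PRECONDITION & SPEC =====
-- Pre_ excludes the empty list (A raises IndexError at numbers[0]) and k ≤ 0, which is outside the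
-- problem's stated domain (LeetCode 1425 has 1 ≤ k): there B raises ValueError (max of an empty window)
-- while A returns a value only by accident of its never-emptied deque.
def Pre_find_constrained_subset_sum (numbers : List Int) (k : Int) : Prop := numbers ≠ [] ∧ 1 ≤ k
instance (numbers : List Int) (k : Int) : Decidable (Pre_find_constrained_subset_sum numbers k) := by
  unfold Pre_find_constrained_subset_sum; infer_instance

def pvWitness_find_constrained_subset_sum : List Int × Int := ([1, -2, 3], 2)

def Spec_find_constrained_subset_sum (numbers : List Int) (k : Int) (out : Int) : Prop := out = find_constrained_subset_sum_alt numbers k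
instance (numbers : List Int) (k : Int) (out : Int) : Decidable (Spec_find_constrained_subset_sum numbers k out) := by unfold Spec_find_constrained_subset_sum; infer_instance

-- ===== CLAIM (what is proved, stated in full; the proofs are below) =====
def Claim_equal_find_constrained_subset_sum : Prop := ∀ (numbers : List Int) (k : Int), Dom_find_constrained_subset_sum numbers k → Pre_find_constrained_subset_sum numbers k → Spec_find_constrained_subset_sum numbers k (find_constrained_subset_sum numbers k)

-- ===== LEMMAS AND PROOFS =====

-- B's best list after processing indices 1..m (it has length m+1)
def pvBB (numbers : List Int) (k : Int) : Nat → List Int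
  | 0 => [PySem.List.pyGetD numbers 0 0]
  | i + 1 =>
    let best := pvBB numbers k i
    let lo := if ((i : Int) + 1) - k > 0 then ((i : Int) + 1) - k else 0
    let window := (PySem.List.max? (PySem.List.slice best (some lo) (some ((i : Int) + 1))) (fun x => x)).getD 0
    best ++ [PySem.List.pyGetD numbers ((i : Int) + 1) 0 + (if window > 0 then window else 0)]

def pvMaxOf : List Int → Int
  | [] => 0
  | x :: t => t.foldl max x

-- the final DP value at index j
def pvV (numbers : List Int) (k : Int) (j : Int) : Int :=
  PySem.List.pyGetD (pvBB numbers k (numbers.length - 1)) j 0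

def pvLo (k : Int) (i : Nat) : Int := if (i : Int) - k > 0 then (i : Int) - k else 0

-- loop invariant of A's fold before processing index i (1 ≤ i ≤ n)
def pvInv (numbers : List Int) (k : Int) (i : Nat) (st : List Int × Int × List Int) : Prop :=
  st.1 = pvBB numbers k (i - 1) ++ List.replicate (numbers.length - i) 0 ∧
  st.2.1 = pvMaxOf (pvBB numbers k (i - 1)) ∧
  st.2.2 ≠ [] ∧
  st.2.2.Pairwise (· < ·) ∧
  (∀ q ∈ st.2.2, pvLo k i ≤ q ∧ q ≤ (i : Int) - 1) ∧
  st.2.2.Pairwise (fun a b => pvV numbers k b < pvV numbers k a) ∧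
  (∀ j : Int, pvLo k i ≤ j → j ≤ (i : Int) - 1 →
    ∃ q ∈ st.2.2, j ≤ q ∧ pvV numbers k j ≤ pvV numbers k q)

theorem pvLo_nonneg (k : Int) (i : Nat) : 0 ≤ pvLo k i := by
  unfold pvLo; split <;> omega

theorem pvBB_length (numbers : List Int) (k : Int) (m : Nat) : (pvBB numbers k m).length = m + 1 := by
  induction m with
  | zero => rfl
  | succ i ih => simp [pvBB, ih]

theorem pvBB_ne_nil (numbers : List Int) (k : Int) (m : Nat) : pvBB numbers k m ≠ [] := by
  have := pvBB_length numbers k m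
  intro h; rw [h] at this; simp at this

theorem pvBB_prefix (numbers : List Int) (k : Int) {m m' : Nat} (h : m ≤ m') :
    pvBB numbers k m <+: pvBB numbers k m' := by
  induction m' with
  | zero => simpa [Nat.le_zero.mp h]
  | succ i ih =>
    rcases Nat.lt_or_ge m (i+1) with h' | h'
    · exact (ih (by omega)).trans ⟨_, rfl⟩
    · have : m = i + 1 := by omega
      simp [this]

-- pvV agrees with reads from any sufficiently long prefix stage
theorem pvV_eq_getD (numbers : List Int) (k : Int) {m : Nat} (hm : m ≤ numbers.length - 1)
    {j : Int} (h0 : 0 ≤ j) (hj : j ≤ (m : Int)) :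
    pvV numbers k j = PySem.List.pyGetD (pvBB numbers k m) j 0 := by
  unfold pvV
  have hpre := pvBB_prefix numbers k (m := m) (m' := numbers.length - 1) hm
  have hl1 := pvBB_length numbers k m
  have hl2 := pvBB_length numbers k (numbers.length - 1)
  have hjm : j.toNat < (pvBB numbers k m).length := by omega
  rw [PySem.List.pyGetD_eq_getElem _ _ h0 (by omega),
      PySem.List.pyGetD_eq_getElem _ _ h0 (by omega)]
  exact (List.IsPrefix.getElem hpre hjm).symm

-- reading inside the prefix of best = bb ++ zeros
theorem pyGetD_append_left (l r : List Int) {q : Int} (h0 : 0 ≤ q) (hq : q < (l.length : Int)) :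
    PySem.List.pyGetD (l ++ r) q 0 = PySem.List.pyGetD l q 0 := by
  rw [PySem.List.pyGetD_eq_getElem _ _ h0 (by simp; omega),
      PySem.List.pyGetD_eq_getElem _ _ h0 (by omega)]
  exact List.getElem_append_left (by omega)

theorem pyGetD_append_length (l r : List Int) (b d : Int) :
    PySem.List.pyGetD (l ++ b :: r) (l.length : Int) d = b := by
  rw [PySem.List.pyGetD_eq_getElem _ _ (by omega) (by simp)]
  exact List.getElem_of_append rfl (by simp)

theorem pvMaxOf_append (l : List Int) (hl : l ≠ []) (b : Int) :
    pvMaxOf (l ++ [b]) = max (pvMaxOf l) b := by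
  cases l with
  | nil => exact absurd rfl hl
  | cons x t => simp [pvMaxOf, List.foldl_append]

theorem pvMaxOf_eq (l : List Int) (c : Int) (hc : c ∈ l) (hb : ∀ y ∈ l, y ≤ c) :
    pvMaxOf l = c := by
  cases l with
  | nil => simp at hc
  | cons x t =>
    show List.foldl max x t = c
    have h1 := PySem.List.le_foldl_max t x
    have hle : List.foldl max x t ≤ c := by
      rcases PySem.List.foldl_max_mem t x with h | h
      · rw [h]; exact hb x List.mem_cons_self
      · exact hb _ (List.mem_cons_of_mem _ h)
    have hge : c ≤ List.foldl max x t := by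
      rcases List.mem_cons.mp hc with rfl | hct
      · exact h1.1
      · exact h1.2 _ hct
    omega

theorem pvMax?_getD (l : List Int) (hl : l ≠ []) :
    (PySem.List.max? l (fun x => x)).getD 0 = pvMaxOf l := by
  cases l with
  | nil => exact absurd rfl hl
  | cons x t => rw [PySem.List.max?_id_cons]; rfl

-- popFront is dropWhile
theorem pvPopFront_eq (bound : Int) (q : List Int) :
    pvPopFront bound q = q.dropWhile (fun x => decide (x < bound)) := by
  induction q with
  | nil => rfl
  | cons x t ih => by_cases h : x < bound <;> simp [pvPopFront, List.dropWhile, h, ih]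

-- popBack is (reverse ∘ dropWhile ∘ reverse)
theorem pvPopBack_eq_rev (best : List Int) (b : Int) (r : List Int) :
    pvPopBack best b r.reverse
      = (r.dropWhile (fun x => decide (PySem.List.pyGetD best x 0 ≤ b))).reverse := by
  induction r with
  | nil => simp [pvPopBack]
  | cons x t ih =>
    rw [List.reverse_cons, pvPopBack]
    by_cases h : PySem.List.pyGetD best x 0 ≤ b
    · simp [PySem.List.pyGetD_neg_one_append_singleton, h, ih, List.dropWhile]
    · simp [PySem.List.pyGetD_neg_one_append_singleton, h, List.dropWhile]

theorem pvPopBack_eq (best : List Int) (b : Int) (q : List Int) :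
    pvPopBack best b q
      = (q.reverse.dropWhile (fun x => decide (PySem.List.pyGetD best x 0 ≤ b))).reverse := by
  have := pvPopBack_eq_rev best b q.reverse
  simpa using this

theorem dropWhile_congr_mem {α : Type} (p q : α → Bool) (l : List α)
    (h : ∀ x ∈ l, p x = q x) : l.dropWhile p = l.dropWhile q := by
  induction l with
  | nil => rfl
  | cons x t ih =>
    have hx := h x List.mem_cons_self
    by_cases hp : p x
    · rw [List.dropWhile_cons_of_pos hp, List.dropWhile_cons_of_pos (hx ▸ hp),
        ih (fun y hy => h y (List.mem_cons_of_mem _ hy))]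
    · rw [List.dropWhile_cons_of_neg hp, List.dropWhile_cons_of_neg (by rw [← hx]; exact hp)]

-- an element failing the predicate survives dropWhile
theorem mem_dropWhile_of_not {α : Type} (p : α → Bool) (l : List α) (x : α)
    (hx : x ∈ l) (hp : p x = false) : x ∈ l.dropWhile p := by
  induction l with
  | nil => simp at hx
  | cons y t ih =>
    by_cases h : p y
    · rcases List.mem_cons.mp hx with rfl | hxt
      · rw [h] at hp; simp at hp
      · simpa [List.dropWhile, h] using ih hxt
    · simpa [List.dropWhile, h] using hx

-- on a chain-increasing list, everything dropWhile keeps exceeds the cut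
theorem dropWhile_all_gt {α : Type} (v : α → Int) (c : Int) (l : List α)
    (hpair : l.Pairwise (fun a d => v a < v d)) :
    ∀ x ∈ l.dropWhile (fun x => decide (v x ≤ c)), c < v x := by
  induction l with
  | nil => simp
  | cons y t ih =>
    rw [List.pairwise_cons] at hpair
    by_cases h : v y ≤ c
    · simpa [List.dropWhile, h] using ih hpair.2
    · intro x hx
      rw [List.dropWhile_cons_of_neg (by simpa using h)] at hx
      rcases List.mem_cons.mp hx with rfl | hxt
      · omega
      · have := hpair.1 x hxt; omega

theorem dropWhile_all_ge (c : Int) (l : List Int) (hpair : l.Pairwise (· < ·)) :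
    ∀ x ∈ l.dropWhile (fun x => decide (x < c)), c ≤ x := by
  induction l with
  | nil => simp
  | cons y t ih =>
    rw [List.pairwise_cons] at hpair
    by_cases h : y < c
    · simpa [List.dropWhile, h] using ih hpair.2
    · intro x hx
      rw [List.dropWhile_cons_of_neg (by simpa using h)] at hx
      rcases List.mem_cons.mp hx with rfl | hxt
      · omega
      · have := hpair.1 x hxt; omega

-- B's fold over range(1, m+1) builds pvBB m
theorem pvAltFold (numbers : List Int) (k : Int) (m : Nat) :
    (PySem.List.pyRange 1 ((m : Int) + 1) 1).foldl (fun best i =>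
      let lo := if i - k > 0 then i - k else 0
      let window := (PySem.List.max? (PySem.List.slice best (some lo) (some i)) (fun x => x)).getD 0
      best ++ [PySem.List.pyGetD numbers i 0 + (if window > 0 then window else 0)])
    [PySem.List.pyGetD numbers 0 0] = pvBB numbers k m := by
  induction m with
  | zero => rw [PySem.List.pyRange_one_eq_nil (by omega)]; rfl
  | succ i ih =>
    have : ((i : Int) + 1 + 1) = (((i + 1 : Nat) : Int) + 1) := by push_cast; ring
    rw [← this, PySem.List.pyRange_one_succ_right (by omega), List.foldl_append, ih]
    simp only [List.foldl_cons, List.foldl_nil]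
    rfl

-- the window slice max read by B equals the value at A's deque head
theorem pvWindow_eq (numbers : List Int) (k : Int) (hk : 1 ≤ k) (i : Nat) (hi : 1 ≤ i)
    (hin : i < numbers.length) (h0 : Int) (queue : List Int)
    (hmem : h0 ∈ queue)
    (hq : ∀ q ∈ queue, pvLo k i ≤ q ∧ q ≤ (i : Int) - 1)
    (hdom : ∀ q ∈ queue, pvV numbers k q ≤ pvV numbers k h0)
    (hcov : ∀ j : Int, pvLo k i ≤ j → j ≤ (i : Int) - 1 →
      ∃ q ∈ queue, j ≤ q ∧ pvV numbers k j ≤ pvV numbers k q) :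
    (PySem.List.max? (PySem.List.slice (pvBB numbers k (i - 1)) (some (pvLo k i)) (some (i : Int)))
        (fun x => x)).getD 0 = pvV numbers k h0 := by
  have hlen := pvBB_length numbers k (i - 1)
  have hlo0 := pvLo_nonneg k i
  have hloi : pvLo k i ≤ (i : Int) - 1 := by unfold pvLo; split <;> omega
  have hslice : PySem.List.slice (pvBB numbers k (i - 1)) (some (pvLo k i)) (some (i : Int))
      = (pvBB numbers k (i - 1)).drop (pvLo k i).toNat := by
    rw [PySem.List.slice_toNat _ hlo0 (by omega)]
    apply List.take_of_length_le
    simp [hlen]; omega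
  have hget : ∀ (j : Nat) (hj : j < ((pvBB numbers k (i - 1)).drop (pvLo k i).toNat).length),
      ((pvBB numbers k (i - 1)).drop (pvLo k i).toNat)[j] = pvV numbers k ((pvLo k i) + (j : Int)) := by
    intro j hj
    have hjlen : (pvLo k i).toNat + j < (pvBB numbers k (i - 1)).length := by
      simp at hj; omega
    rw [List.getElem_drop]
    rw [pvV_eq_getD numbers k (m := i - 1) (by omega) (by omega) (by push_cast; omega)]
    rw [PySem.List.pyGetD_eq_getElem _ _ (by omega) (by push_cast; omega)]
    congr 1
    omega
  have hdlen : ((pvBB numbers k (i - 1)).drop (pvLo k i).toNat).length = i - (pvLo k i).toNat := by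
    simp [hlen]; omega
  rw [hslice, pvMax?_getD _ (by
    intro h; rw [h] at hdlen; simp at hdlen; omega)]
  apply pvMaxOf_eq
  · -- pvV h0 is in the window
    obtain ⟨hql, hqu⟩ := hq h0 hmem
    have hlt : (h0 - pvLo k i).toNat < ((pvBB numbers k (i - 1)).drop (pvLo k i).toNat).length := by
      omega
    have hh : pvV numbers k h0
        = ((pvBB numbers k (i - 1)).drop (pvLo k i).toNat)[(h0 - pvLo k i).toNat] := by
      rw [hget _ hlt]
      congr 1
      omega
    rw [hh]
    exact List.getElem_mem hlt
  · intro y hy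
    obtain ⟨j, hj, rfl⟩ := List.mem_iff_getElem.mp hy
    rw [hget j hj]
    obtain ⟨q, hqmem, _, hle⟩ := hcov (pvLo k i + j) (by omega) (by omega)
    exact le_trans hle (hdom q hqmem)

-- unfolding pvBB at a positive index, phrased with pvLo
theorem pvBB_succ (numbers : List Int) (k : Int) (i : Nat) (hi : 1 ≤ i) :
    pvBB numbers k i = pvBB numbers k (i - 1) ++
      [PySem.List.pyGetD numbers (i : Int) 0 +
        (if (PySem.List.max? (PySem.List.slice (pvBB numbers k (i - 1)) (some (pvLo k i))
              (some (i : Int))) (fun x => x)).getD 0 > 0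
         then (PySem.List.max? (PySem.List.slice (pvBB numbers k (i - 1)) (some (pvLo k i))
              (some (i : Int))) (fun x => x)).getD 0 else 0)] := by
  obtain ⟨j, rfl⟩ : ∃ j, i = j + 1 := ⟨i - 1, by omega⟩
  have hc : ((j : Int) + 1) = (((j + 1 : Nat) : Int)) := by push_cast; ring
  simp only [pvBB, pvLo, Nat.add_sub_cancel, hc]

-- THE STEP LEMMA: one iteration of A preserves the invariant
theorem pvStep (numbers : List Int) (k : Int) (hk : 1 ≤ k) (i : Nat) (hi : 1 ≤ i)
    (hin : i < numbers.length) (st : List Int × Int × List Int)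
    (hinv : pvInv numbers k i st) :
    pvInv numbers k (i + 1) (pvAStep k st ((i : Int), PySem.List.pyGetD numbers (i : Int) 0)) := by
  obtain ⟨hbest, hms, hne, hpairlt, hq, hpairv, hcov⟩ := hinv
  obtain ⟨best, ms, queue⟩ := st
  simp only at hbest hms hne hpairlt hq hpairv hcov
  obtain ⟨h0, t, rfl⟩ : ∃ h0 t, queue = h0 :: t := by
    cases queue with
    | nil => exact absurd rfl hne
    | cons a b => exact ⟨a, b, rfl⟩
  have hlen := pvBB_length numbers k (i - 1)
  have hlo0 := pvLo_nonneg k i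
  have hh0 := hq h0 List.mem_cons_self
  -- dominance of the head
  have hdom : ∀ q ∈ h0 :: t, pvV numbers k q ≤ pvV numbers k h0 := by
    intro q hq'
    rcases List.mem_cons.mp hq' with rfl | hqt
    · omega
    · have := (List.pairwise_cons.mp hpairv).1 q hqt; omega
  -- the value A reads at the head
  have hread : PySem.List.pyGetD best h0 0 = pvV numbers k h0 := by
    rw [hbest, pyGetD_append_left _ _ (by omega) (by rw [hlen]; push_cast; omega)]
    exact (pvV_eq_getD numbers k (by omega) (by omega) (by omega)).symm
  -- the written value b equals pvV i
  set b := PySem.List.pyGetD numbers (i : Int) 0 + max (pvV numbers k h0) 0 with hbdef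
  have hwin := pvWindow_eq numbers k hk i hi hin h0 (h0 :: t) List.mem_cons_self hq hdom hcov
  have hbbsucc := pvBB_succ numbers k i hi
  have hbv : pvBB numbers k i = pvBB numbers k (i - 1) ++ [b] := by
    rw [hbbsucc, hwin, hbdef]
    congr 3
    by_cases h : pvV numbers k h0 > 0 <;> simp [h] <;> omega
  have hvi : pvV numbers k (i : Int) = b := by
    rw [pvV_eq_getD numbers k (m := i) (by omega) (by omega) (by omega), hbv]
    have hc : (i : Int) = ((pvBB numbers k (i - 1)).length : Int) := by rw [hlen]; push_cast; omega
    rw [hc]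
    exact pyGetD_append_length _ [] b 0
  -- the new best list
  have hnb : best.set (i : Int).toNat b = pvBB numbers k i ++ List.replicate (numbers.length - (i + 1)) 0 := by
    rw [hbest, hbv]
    have hrep : List.replicate (numbers.length - i) (0 : Int)
        = 0 :: List.replicate (numbers.length - (i + 1)) 0 := by
      have : numbers.length - i = (numbers.length - (i + 1)) + 1 := by omega
      rw [this, List.replicate_succ]
    rw [hrep]
    have hpos : (i : Int).toNat = (pvBB numbers k (i - 1)).length := by rw [hlen]; omega
    rw [hpos, List.set_append_right _ _ (le_refl _)]
    simp
  -- reads of the new best at old queue indices are unchanged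
  have hread' : ∀ x : Int, pvLo k i ≤ x → x ≤ (i : Int) - 1 →
      PySem.List.pyGetD (best.set (i : Int).toNat b) x 0 = pvV numbers k x := by
    intro x hx1 hx2
    rw [hnb, pyGetD_append_left _ _ (by omega) (by rw [pvBB_length]; push_cast; omega)]
    exact (pvV_eq_getD numbers k (m := i) (by omega) (by omega) (by omega)).symm
  -- characterise the queue after popBack
  set Q1 := pvPopBack (best.set (i : Int).toNat b) b (h0 :: t) with hQ1def
  have hQ1 : Q1 = ((h0 :: t).reverse.dropWhile (fun x => decide (pvV numbers k x ≤ b))).reverse := by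
    rw [hQ1def, pvPopBack_eq]
    congr 1
    apply dropWhile_congr_mem
    intro x hx
    have hxm : x ∈ h0 :: t := List.mem_reverse.mp hx
    obtain ⟨hx1, hx2⟩ := hq x hxm
    rw [hread' x hx1 hx2]
  have hQ1sub : List.Sublist Q1 (h0 :: t) := by
    rw [hQ1]
    have := List.dropWhile_sublist (l := (h0 :: t).reverse)
      (p := fun x => decide (pvV numbers k x ≤ b))
    simpa using List.reverse_sublist.mpr this
  have hQ1gt : ∀ x ∈ Q1, b < pvV numbers k x := by
    intro x hx
    rw [hQ1, List.mem_reverse] at hx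
    exact dropWhile_all_gt (pvV numbers k) b _ (List.pairwise_reverse.mpr hpairv) x hx
  have hQ1keep : ∀ x ∈ h0 :: t, b < pvV numbers k x → x ∈ Q1 := by
    intro x hx hbx
    rw [hQ1, List.mem_reverse]
    exact mem_dropWhile_of_not _ _ _ (List.mem_reverse.mpr hx) (by simp; omega)
  -- characterise the queue after popFront
  set B0 := (i : Int) - k + 1 with hB0def
  set Q2 := pvPopFront B0 Q1 with hQ2def
  have hQ2 : Q2 = Q1.dropWhile (fun x => decide (x < B0)) := pvPopFront_eq B0 Q1
  have hQ2sub : List.Sublist Q2 Q1 := by rw [hQ2]; exact List.dropWhile_sublist _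
  have hQ2ge : ∀ x ∈ Q2, B0 ≤ x := by
    rw [hQ2]
    exact dropWhile_all_ge B0 Q1 (List.Pairwise.sublist hQ1sub hpairlt)
  have hQ2keep : ∀ x ∈ Q1, B0 ≤ x → x ∈ Q2 := by
    intro x hx hbx
    rw [hQ2]
    exact mem_dropWhile_of_not _ _ _ hx (by simp; omega)
  have hQ2mem : ∀ x ∈ Q2, x ∈ h0 :: t := fun x hx => hQ1sub.mem (hQ2sub.mem hx)
  -- now assemble pvInv (i+1)
  have hguard : (((i : Int)) == 0) = false := by simp; omega
  unfold pvAStep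
  simp only [hguard, Bool.false_eq_true, if_false, PySem.List.pyGetD_zero_cons, hread]
  rw [← hbdef]
  refine ⟨?_, ?_, ?_, ?_, ?_, ?_, ?_⟩
  · simp only [Nat.add_sub_cancel]
    exact hnb
  · simp only [hms, Nat.add_sub_cancel]
    rw [hbv, pvMaxOf_append _ (pvBB_ne_nil _ _ _)]
    by_cases h : b > pvMaxOf (pvBB numbers k (i - 1)) <;> simp [h] <;> omega
  · simp
  · simp only []
    rw [List.pairwise_append]
    refine ⟨List.Pairwise.sublist hQ2sub (List.Pairwise.sublist hQ1sub hpairlt), by simp, ?_⟩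
    intro a ha b' hb'
    simp at hb'
    subst hb'
    have := hq a (hQ2mem a ha)
    omega
  · intro q hq'
    rcases List.mem_append.mp hq' with hq2 | hqi
    · have h1 := hQ2ge q hq2
      have h2 := hq q (hQ2mem q hq2)
      constructor
      · unfold pvLo; split <;> push_cast <;> omega
      · push_cast; omega
    · simp at hqi
      subst hqi
      constructor
      · unfold pvLo; split <;> push_cast <;> omega
      · push_cast; omega
  · rw [List.pairwise_append]
    refine ⟨List.Pairwise.sublist hQ2sub (List.Pairwise.sublist hQ1sub hpairv), by simp, ?_⟩
    intro a ha b' hb'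
    simp at hb'
    subst hb'
    rw [hvi]
    exact hQ1gt a (hQ2sub.mem ha)
  · intro j hj1 hj2
    push_cast at hj2
    by_cases hji : j = (i : Int)
    · subst hji
      exact ⟨(i : Int), by simp, le_refl _, le_refl _⟩
    · have hj2' : j ≤ (i : Int) - 1 := by omega
      have hj1' : pvLo k i ≤ j := by
        have : pvLo k (i + 1) ≤ j := hj1
        unfold pvLo at this ⊢
        split at this <;> split <;> push_cast at * <;> omega
      obtain ⟨q, hqmem, hjq, hvjq⟩ := hcov j hj1' hj2'
      by_cases hqb : b < pvV numbers k q
      · -- q survives both pops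
        have hq1 : q ∈ Q1 := hQ1keep q hqmem hqb
        have hq2 : q ∈ Q2 := by
          apply hQ2keep q hq1
          have : pvLo k (i + 1) ≤ j := hj1
          unfold pvLo at this
          rw [hB0def]
          split at this <;> push_cast at this <;> omega
        exact ⟨q, List.mem_append.mpr (Or.inl hq2), hjq, hvjq⟩
      · -- q was popped in favour of the freshly appended i
        refine ⟨(i : Int), by simp, by omega, ?_⟩
        rw [hvi]
        omega

-- THE RUN LEMMA: folding A's loop from index i to the end
theorem pvRun (numbers : List Int) (k : Int) (hk : 1 ≤ k) :
    ∀ (m i : Nat) (st : List Int × Int × List Int), i + m = numbers.length → 1 ≤ i →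
    pvInv numbers k i st →
    ((PySem.List.enumerate (numbers.drop i) (i : Int)).foldl (pvAStep k) st).2.1
      = pvMaxOf (pvBB numbers k (numbers.length - 1)) := by
  intro m
  induction m with
  | zero =>
    intro i st him hi hinv
    have : i = numbers.length := by omega
    subst this
    rw [List.drop_of_length_le (by omega), PySem.List.enumerate_nil, List.foldl_nil]
    rw [hinv.2.1]
  | succ m' ih =>
    intro i st him hi hinv
    have hilt : i < numbers.length := by omega
    rw [List.drop_eq_getElem_cons hilt, PySem.List.enumerate_cons, List.foldl_cons]
    have he : numbers[i] = PySem.List.pyGetD numbers (i : Int) 0 := by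
      rw [PySem.List.pyGetD_eq_getElem _ _ (by omega) (by push_cast; omega)]
      simp
    rw [he]
    have hstep := pvStep numbers k hk i hi hilt st hinv
    have : ((i : Int) + 1) = (((i + 1 : Nat) : Int)) := by push_cast; ring
    rw [this]
    exact ih (i + 1) _ (by omega) (by omega) hstep

-- ===== VERDICT (by name: the statement is the Claim_ definition above) =====
theorem find_constrained_subset_sum_spec : Claim_equal_find_constrained_subset_sum := by
  intro numbers k _hdom hpre
  obtain ⟨hne, hk⟩ := hpre
  unfold Spec_find_constrained_subset_sum
  have hn : 1 ≤ numbers.length := List.length_pos_of_ne_nil hne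
  -- B's side: the fold builds pvBB (n-1)
  have hB : find_constrained_subset_sum_alt numbers k
      = pvMaxOf (pvBB numbers k (numbers.length - 1)) := by
    unfold find_constrained_subset_sum_alt
    have hcast : (numbers.length : Int) = ((numbers.length - 1 : Nat) : Int) + 1 := by
      push_cast [Nat.cast_sub hn]; ring
    rw [hcast, pvAltFold numbers k (numbers.length - 1)]
    exact pvMax?_getD _ (pvBB_ne_nil _ _ _)
  rw [hB]
  -- A's side
  cases numbers with
  | nil => exact absurd rfl hne
  | cons x rest =>
    have hA : find_constrained_subset_sum (x :: rest) k
        = ((PySem.List.enumerate (x :: rest) 0).foldl (pvAStep k)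
            ([PySem.List.pyGetD (x :: rest) 0 0] ++ PySem.List.pyRepeat [(0 : Int)] (((x :: rest).length : Int) - 1),
              PySem.List.pyGetD (x :: rest) 0 0, [(0 : Int)])).2.1 := rfl
    rw [hA, PySem.List.enumerate_cons, List.foldl_cons]
    have hskip : pvAStep k
        ([PySem.List.pyGetD (x :: rest) 0 0] ++ PySem.List.pyRepeat [(0 : Int)] (((x :: rest).length : Int) - 1),
          PySem.List.pyGetD (x :: rest) 0 0, [(0 : Int)]) ((0 : Int), x)
        = ([PySem.List.pyGetD (x :: rest) 0 0] ++ PySem.List.pyRepeat [(0 : Int)] (((x :: rest).length : Int) - 1),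
          PySem.List.pyGetD (x :: rest) 0 0, [(0 : Int)]) := by
      unfold pvAStep
      simp
    rw [hskip]
    have hinv1 : pvInv (x :: rest) k 1
        ([PySem.List.pyGetD (x :: rest) 0 0] ++ PySem.List.pyRepeat [(0 : Int)] (((x :: rest).length : Int) - 1),
          PySem.List.pyGetD (x :: rest) 0 0, [(0 : Int)]) := by
      refine ⟨?_, ?_, by simp, by simp, ?_, by simp, ?_⟩
      · show _ = pvBB (x :: rest) k 0 ++ _
        rw [PySem.List.pyRepeat_singleton]
        simp only [pvBB]
        congr 2
        simp
      · show _ = pvMaxOf (pvBB (x :: rest) k 0)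
        rfl
      · intro q hq
        simp at hq
        subst hq
        refine ⟨?_, by omega⟩
        unfold pvLo
        split <;> omega
      · intro j hj1 hj2
        have hl := pvLo_nonneg k 1
        have : j = 0 := by omega
        subst this
        exact ⟨0, by simp, by omega, by omega⟩
    have h01 : ((0 : Int) + 1) = (((1 : Nat)) : Int) := by norm_num
    rw [h01]
    have hrun := pvRun (x :: rest) k hk ((x :: rest).length - 1) 1 _ (by simp; omega) (by omega) hinv1
    have hrest : (x :: rest).drop 1 = rest := rfl
    rw [hrest] at hrun
    exact hrun
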